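-- pv_equiv track=rewrite | github.com/tyraziel/MTG-JumpStart | etc/parsing-scripts/batch_reformat.py | normalize_basic_land
-- ===== SOURCE A (Python) =====
-- def normalize_basic_land(card_name: str) -> str:
--     """
--     Normalize special basic land variants to standard names.
--
--     Examples:
--         "Above the Clouds Island" -> "Island"
--         "Full-art stained-glass Plains" -> "Plains"
--         "Traditional foil Mountain" -> "Mountain"
--         "Thriving Isle" -> "Thriving Isle" (not a basic land)
--         "Tropical Island" -> "Tropical Island" (dual land, keep as-is)
--     """
--     basic_lands = ['Plains', 'Island', 'Swamp', 'Mountain', 'Forest']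
--
--     # Exact match - already a basic land
--     if card_name in basic_lands:
--         return card_name
--
--     # Known dual lands and special lands (NOT basic land variants)
--     dual_lands = {
--         'Tropical Island', 'Volcanic Island', 'Underground Sea', 'Badlands', 'Bayou',
--         'Plateau', 'Savannah', 'Scrubland', 'Taiga', 'Tundra',
--         'Thriving Isle', 'Thriving Heath', 'Thriving Bluff', 'Thriving Moor', 'Thriving Grove'
--     }
--
--     if card_name in dual_lands:
--         return card_name
--
--     # Known prefixes for special basic land variants
--     special_prefixes = [
--         'Full-art stained-glass',
--         'Traditional foil',
--         'Snow-Covered'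
--     ]
--
--     # Check for known special prefixes
--     for prefix in special_prefixes:
--         for basic in basic_lands:
--             if card_name == f"{prefix} {basic}":
--                 return basic
--
--     # Check if it matches pattern "[Theme Name] [Basic Land]"
--     # This handles JumpStart special basics like "Above the Clouds Island"
--     for basic in basic_lands:
--         if card_name.endswith(f" {basic}"):
--             # It's a JumpStart theme basic land variant
--             return basic
--
--     return card_name
-- ===== SOURCE B (Python) =====
-- _BASIC_LANDS = {'Plains', 'Island', 'Swamp', 'Mountain', 'Forest'}
-- _DUAL_LANDS = {
--     'Tropical Island', 'Volcanic Island', 'Underground Sea', 'Badlands', 'Bayou',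
--     'Plateau', 'Savannah', 'Scrubland', 'Taiga', 'Tundra',
--     'Thriving Isle', 'Thriving Heath', 'Thriving Bluff', 'Thriving Moor', 'Thriving Grove'
-- }
--
-- def normalize_basic_land(card_name: str) -> str:
--     if card_name in _BASIC_LANDS or card_name in _DUAL_LANDS:
--         return card_name
--     _, sep, last = card_name.rpartition(' ')
--     if sep and last in _BASIC_LANDS:
--         return last
--     return card_name
-- ===== Notes on version B (the rewrite author's own statement) =====
-- stated objective: simpler
-- what changed: Replaces the redundant prefix x basic double loop and the five endswith scans by one rpartition(' ') extracting the trailing word and a single set-membership test.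
import Mathlib
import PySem

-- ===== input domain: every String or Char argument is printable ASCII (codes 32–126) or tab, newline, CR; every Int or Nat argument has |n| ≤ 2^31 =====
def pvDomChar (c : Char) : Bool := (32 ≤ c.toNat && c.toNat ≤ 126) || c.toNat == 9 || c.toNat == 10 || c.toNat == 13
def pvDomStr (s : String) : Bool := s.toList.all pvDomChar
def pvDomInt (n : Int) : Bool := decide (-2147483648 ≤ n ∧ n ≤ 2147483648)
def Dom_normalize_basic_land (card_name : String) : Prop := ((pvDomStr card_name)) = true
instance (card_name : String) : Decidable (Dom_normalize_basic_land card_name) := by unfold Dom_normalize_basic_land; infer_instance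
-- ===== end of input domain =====

-- B replaces A's redundant prefix×basic double loop and five endswith scans by one
-- rpartition(' ') trailing-word extraction plus a set-membership test (objective: simpler).


-- ===== PORT A =====
def pvBasicLands : List String := ["Plains", "Island", "Swamp", "Mountain", "Forest"]

def pvDualLands : PySem.Set String := PySem.Set.ofList
  ["Tropical Island", "Volcanic Island", "Underground Sea", "Badlands", "Bayou",
   "Plateau", "Savannah", "Scrubland", "Taiga", "Tundra",
   "Thriving Isle", "Thriving Heath", "Thriving Bluff", "Thriving Moor", "Thriving Grove"]

def pvSpecialPrefixes : List String := ["Full-art stained-glass", "Traditional foil", "Snow-Covered"]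

-- literal transliteration of A: guards, the prefix×basic equality loop, then the endswith loop
def normalize_basic_land (card_name : String) : String :=
  if card_name ∈ pvBasicLands then card_name
  else if card_name ∈ pvDualLands then card_name
  else
    match pvSpecialPrefixes.findSome? (fun p =>
      pvBasicLands.findSome? (fun basic =>
        if card_name = PySem.Str.join " " [p, basic] then some basic else none)) with
    | some basic => basic
    | none =>
      match pvBasicLands.findSome? (fun basic =>
        if PySem.Str.endswith card_name (PySem.Str.join " " ["", basic]) then some basic else none) with
      | some basic => basic
      | none => card_name

-- ===== PORT B =====
def pvBasicSet : PySem.Set String := PySem.Set.ofList ["Plains", "Island", "Swamp", "Mountain", "Forest"]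

-- hand port of `_, sep, last = card_name.rpartition(' ')`: scan the reversed chars; `some w`
-- iff a space separator is present (sep ≠ ''), with w the part after the last space — exact.
def pvRpartLast : List Char → List Char → Option (List Char)
  | [], _ => none
  | c :: rest, acc => if c = ' ' then some acc else pvRpartLast rest (c :: acc)

def normalize_basic_land_alt (card_name : String) : String :=
  if card_name ∈ pvBasicSet ∨ card_name ∈ pvDualLands then card_name
  else
    match pvRpartLast card_name.toList.reverse [] with
    | some w => if String.ofList w ∈ pvBasicSet then String.ofList w else card_name
    | none => card_name

-- ===== PRECONDITION & SPEC =====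
def Spec_normalize_basic_land (card_name : String) (out : String) : Prop := out = normalize_basic_land_alt card_name
instance (card_name : String) (out : String) : Decidable (Spec_normalize_basic_land card_name out) := by unfold Spec_normalize_basic_land; infer_instance

-- ===== CLAIM (what is proved, stated in full; the proofs are below) =====
def Claim_equal_normalize_basic_land : Prop := ∀ (card_name : String), Dom_normalize_basic_land card_name → Spec_normalize_basic_land card_name (normalize_basic_land card_name)

-- ===== LEMMAS AND PROOFS =====

theorem pvRpartLast_append (v rest acc : List Char) (hv : ' ' ∉ v) :
    pvRpartLast (v ++ ' ' :: rest) acc = some (v.reverse ++ acc) := by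
  induction v generalizing acc with
  | nil => simp [pvRpartLast]
  | cons c v ih =>
    simp only [List.mem_cons, not_or] at hv
    have hc : ¬ c = ' ' := fun h => hv.1 h.symm
    simp [pvRpartLast, hc, ih _ hv.2]

theorem pvRpartLast_sound (r : List Char) (acc u : List Char)
    (h : pvRpartLast r acc = some u) :
    ∃ v rest, r = v ++ ' ' :: rest ∧ ' ' ∉ v ∧ u = v.reverse ++ acc := by
  induction r generalizing acc with
  | nil => simp [pvRpartLast] at h
  | cons c rest ih =>
    by_cases hc : c = ' '
    · subst hc
      simp [pvRpartLast] at h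
      exact ⟨[], rest, by simp, by simp, by simp [h]⟩
    · simp only [pvRpartLast, if_neg hc] at h
      obtain ⟨v, rest', hr, hv, hu⟩ := ih _ h
      exact ⟨c :: v, rest', by simp [hr],
        by simp only [List.mem_cons, not_or]; exact ⟨fun h => hc h.symm, hv⟩, by simp [hu]⟩

theorem endswith_iff_rpart (cs w : List Char) (hw : ' ' ∉ w) :
    PySem.Chars.endswith cs (' ' :: w) = true ↔ pvRpartLast cs.reverse [] = some w := by
  rw [PySem.Chars.endswith_iff]
  constructor
  · rintro ⟨pre, hpre⟩
    have : cs.reverse = w.reverse ++ ' ' :: pre.reverse := by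
      rw [← hpre]; simp
    rw [this, pvRpartLast_append _ _ _ (by simpa using hw)]
    simp
  · intro h
    obtain ⟨v, rest, hr, hv, hu⟩ := pvRpartLast_sound _ _ _ h
    simp only [List.append_nil] at hu
    refine ⟨rest.reverse, ?_⟩
    have : cs = rest.reverse ++ ' ' :: v.reverse := by
      have := congrArg List.reverse hr
      simpa using this
    rw [this, hu]

theorem ewC_eq (s : String) (bl : List Char) (hw : ' ' ∉ bl)
    (hj : PySem.Chars.join [' '] [[], bl] = ' ' :: bl) :
    PySem.Chars.endswith s.toList (PySem.Chars.join [' '] [[], bl])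
      = decide (pvRpartLast s.toList.reverse [] = some bl) := by
  rw [hj]
  by_cases h : pvRpartLast s.toList.reverse [] = some bl
  · simp only [h, decide_true]
    exact (endswith_iff_rpart s.toList bl hw).mpr h
  · simp only [h, decide_false]
    rw [← Bool.not_eq_true, endswith_iff_rpart s.toList bl hw]
    exact h

theorem mem_basicSet_iff (s : String) : s ∈ pvBasicSet ↔ s ∈ pvBasicLands := by
  simp [pvBasicSet, pvBasicLands, PySem.Set.mem_ofList]

-- ===== VERDICT (by name: the statement is the Claim_ definition above) =====
theorem normalize_basic_land_spec : Claim_equal_normalize_basic_land := by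
  intro card_name _
  unfold Spec_normalize_basic_land
  by_cases hb : card_name ∈ pvBasicLands
  · have hb' : card_name ∈ pvBasicSet := (mem_basicSet_iff card_name).mpr hb
    unfold normalize_basic_land normalize_basic_land_alt
    rw [if_pos hb, if_pos (Or.inl hb')]
  · by_cases hd : card_name ∈ pvDualLands
    · unfold normalize_basic_land normalize_basic_land_alt
      rw [if_neg hb, if_pos hd, if_pos (Or.inr hd)]
    · unfold normalize_basic_land normalize_basic_land_alt
      rw [if_neg hb, if_neg hd,
        if_neg (by rintro (h | h); exacts [hb ((mem_basicSet_iff card_name).mp h), hd h])]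
      cases hpre : pvSpecialPrefixes.findSome? (fun p =>
          pvBasicLands.findSome? (fun basic =>
            if card_name = PySem.Str.join " " [p, basic] then some basic else none)) with
      | some b =>
        obtain ⟨p, hp, hpb⟩ := List.exists_of_findSome?_eq_some hpre
        obtain ⟨bb, hbb, hif⟩ := List.exists_of_findSome?_eq_some hpb
        have hc : card_name = PySem.Str.join " " [p, bb] ∧ bb = b := by
          by_cases h : card_name = PySem.Str.join " " [p, bb]
          · rw [if_pos h] at hif; exact ⟨h, Option.some.inj hif⟩
          · rw [if_neg h] at hif; cases hif
        obtain ⟨hcard, rfl⟩ := hc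
        subst hcard
        simp only [pvSpecialPrefixes, List.mem_cons, List.not_mem_nil, or_false] at hp
        simp only [pvBasicLands, List.mem_cons, List.not_mem_nil, or_false] at hbb
        rcases hp with rfl | rfl | rfl <;> rcases hbb with rfl | rfl | rfl | rfl | rfl <;> decide
      | none =>
        have eP := ewC_eq card_name ['P','l','a','i','n','s'] (by decide) (by decide)
        have eI := ewC_eq card_name ['I','s','l','a','n','d'] (by decide) (by decide)
        have eS := ewC_eq card_name ['S','w','a','m','p'] (by decide) (by decide)
        have eM := ewC_eq card_name ['M','o','u','n','t','a','i','n'] (by decide) (by decide)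
        have eF := ewC_eq card_name ['F','o','r','e','s','t'] (by decide) (by decide)
        cases hlp : pvRpartLast card_name.toList.reverse [] with
        | none =>
          rw [hlp] at eP eI eS eM eF
          simp at eP eI eS eM eF
          simp [pvBasicLands, List.findSome?_nil, eP, eI, eS, eM, eF]
        | some w =>
          rw [hlp] at eP eI eS eM eF
          by_cases hw : String.ofList w ∈ pvBasicSet
          · have hw' : String.ofList w = "Plains" ∨ String.ofList w = "Island" ∨
                String.ofList w = "Swamp" ∨ String.ofList w = "Mountain" ∨
                String.ofList w = "Forest" := by
              simpa [pvBasicSet, PySem.Set.mem_ofList] using hw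
            rcases hw' with h | h | h | h | h <;>
            · have hwl : w = (String.ofList w).toList := by simp
              rw [h] at hwl
              subst hwl
              simp at eP eI eS eM eF
              simp [pvBasicLands, eP, eI, eS, eM, eF, pvBasicSet, PySem.Set.mem_ofList]
          · have neP : w ≠ ['P','l','a','i','n','s'] := fun hEq => hw (by rw [hEq]; decide)
            have neI : w ≠ ['I','s','l','a','n','d'] := fun hEq => hw (by rw [hEq]; decide)
            have neS : w ≠ ['S','w','a','m','p'] := fun hEq => hw (by rw [hEq]; decide)
            have neM : w ≠ ['M','o','u','n','t','a','i','n'] := fun hEq => hw (by rw [hEq]; decide)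
            have neF : w ≠ ['F','o','r','e','s','t'] := fun hEq => hw (by rw [hEq]; decide)
            simp [neP, neI, neS, neM, neF] at eP eI eS eM eF
            simp [pvBasicLands, List.findSome?_nil, eP, eI, eS, eM, eF, hw]
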